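-- pv_equiv track=rewrite | github.com/kim-se-hee/electric-vehicle-market-trend-analysis | market_research/utils/utils.py | truncate_documents
-- ===== SOURCE A (Python) =====
-- from typing import List, Dict
--
-- def truncate_documents(documents: List[str], max_tokens: int = 8000) -> List[str]:
--     """문서를 토큰 제한에 맞게 자르기"""
--     truncated = []
--     total_chars = 0
--     # 대략 1 토큰 = 4 글자로 계산
--     max_chars = max_tokens * 4
--
--     for doc in documents:
--         if total_chars + len(doc) <= max_chars:
--             truncated.append(doc)
--             total_chars += len(doc)
--         else:
--             remaining = max_chars - total_chars
--             if remaining > 500:  # 최소 500자는 포함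
--                 truncated.append(doc[:remaining])
--             break
--
--     return truncated
-- ===== SOURCE B (Python) =====
-- def truncate_documents(documents, max_tokens=8000):
--     """Prefix-sum decomposition: find the cut index once, then slice."""
--     max_chars = max_tokens * 4
--     prefix = [0]
--     for d in documents:
--         prefix.append(prefix[-1] + len(d))
--     cut = next((k for k in range(len(documents)) if prefix[k + 1] > max_chars),
--                None)
--     if cut is None:
--         return list(documents)
--     head = documents[:cut]
--     remaining = max_chars - prefix[cut]
--     if remaining > 500:
--         head.append(documents[cut][:remaining])
--     return head
-- ===== Notes on version B (the rewrite author's own statement) =====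
-- stated objective: alternative
-- what changed: Replaces A's single accumulate-and-break loop with a two-phase decomposition: build the prefix-sum table of document lengths, locate the first overflow index, then assemble the answer by slicing documents[:cut] and appending the truncated piece.
import Mathlib
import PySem

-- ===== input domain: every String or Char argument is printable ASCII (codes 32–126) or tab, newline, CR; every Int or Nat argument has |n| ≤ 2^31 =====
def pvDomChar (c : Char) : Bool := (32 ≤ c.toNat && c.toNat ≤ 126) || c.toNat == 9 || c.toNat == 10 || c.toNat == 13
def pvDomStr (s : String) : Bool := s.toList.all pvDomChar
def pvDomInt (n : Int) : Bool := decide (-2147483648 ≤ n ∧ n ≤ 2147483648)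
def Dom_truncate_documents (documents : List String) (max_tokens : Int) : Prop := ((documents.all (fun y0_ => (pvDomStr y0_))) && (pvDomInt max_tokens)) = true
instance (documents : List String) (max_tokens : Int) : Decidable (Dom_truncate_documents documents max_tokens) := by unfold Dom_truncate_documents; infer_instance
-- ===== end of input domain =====

-- B replaces A's accumulate-and-break loop by a two-phase decomposition (prefix-sum table, then one
-- overflow-index search and slicing); objective: alternative (same O(n) cost).

-- ===== PORT A =====
-- the for-loop of A, with its state (truncated, total_chars)
def truncAuxA (max_chars : Int) (documents : List String)
    (truncated : List String) (total_chars : Int) : List String :=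
  match documents with
  | [] => truncated
  | d :: rest =>
    if total_chars + PySem.Str.len d ≤ max_chars then
      truncAuxA max_chars rest (truncated ++ [d]) (total_chars + PySem.Str.len d)
    else
      let remaining := max_chars - total_chars
      if remaining > 500 then truncated ++ [PySem.Str.slice d none (some remaining)]
      else truncated

def truncate_documents (documents : List String) (max_tokens : Int) : List String :=
  truncAuxA (max_tokens * 4) documents [] 0

-- ===== PORT B =====
def truncate_documents_alt (documents : List String) (max_tokens : Int) : List String :=
  let max_chars := max_tokens * 4
  -- prefix = [0]; for d in documents: prefix.append(prefix[-1] + len(d))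
  let pfx : List Int :=
    documents.foldl (fun acc d => acc ++ [acc.getLast! + PySem.Str.len d]) [0]
  -- cut = next((k for k in range(len(documents)) if prefix[k+1] > max_chars), None)
  match (pfx.drop 1).findIdx? (fun c => max_chars < c) with
  | none => documents
  | some cut =>
    let head := PySem.List.slice documents none (some (cut : Int))
    let remaining := max_chars - pfx.getD cut 0
    if remaining > 500 then
      head ++ [PySem.Str.slice (documents.getD cut "") none (some remaining)]
    else head

-- ===== PRECONDITION & SPEC =====
def Spec_truncate_documents (documents : List String) (max_tokens : Int) (out : List String) : Prop := out = truncate_documents_alt documents max_tokens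
instance (documents : List String) (max_tokens : Int) (out : List String) : Decidable (Spec_truncate_documents documents max_tokens out) := by unfold Spec_truncate_documents; infer_instance

-- ===== CLAIM (what is proved, stated in full; the proofs are below) =====
def Claim_equal_truncate_documents : Prop := ∀ (documents : List String) (max_tokens : Int), Dom_truncate_documents documents max_tokens → Spec_truncate_documents documents max_tokens (truncate_documents documents max_tokens)

-- ===== LEMMAS AND PROOFS =====

-- running prefix sums of the documents' lengths starting from total t (prefix[1:], offset by t)
def psums (docs : List String) (t : Int) : List Int :=
  match docs with
  | [] => []
  | d :: r => (t + PySem.Str.len d) :: psums r (t + PySem.Str.len d)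

-- the value B computes after the prefix table is built, with offset t
def bCore (mc : Int) (docs : List String) (t : Int) : List String :=
  match (psums docs t).findIdx? (fun c => mc < c) with
  | none => docs
  | some cut =>
    let remaining := mc - (t :: psums docs t).getD cut 0
    docs.take cut ++
      (if remaining > 500 then
        [PySem.Str.slice (docs.getD cut "") none (some remaining)]
      else [])

theorem foldl_prefix (docs : List String) :
    ∀ (acc : List Int) (t : Int),
      docs.foldl (fun acc d => acc ++ [acc.getLast! + PySem.Str.len d]) (acc ++ [t])
        = acc ++ t :: psums docs t := by
  induction docs with
  | nil => intro acc t; simp [psums]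
  | cons d r ih =>
    intro acc t
    have h : (acc ++ [t]).getLast! = t := by
      cases hc : acc ++ [t] with
      | nil => simp at hc
      | cons a as =>
        simp only [List.getLast!]
        have : (a :: as).getLast (by simp) = t := by
          rw [List.getLast_congr _ _ hc.symm]; exact List.getLast_concat
        exact this
    simp only [List.foldl_cons, h, psums]
    have := ih (acc ++ [t]) (t + PySem.Str.len d)
    simpa using this

theorem truncAuxA_eq (mc : Int) (docs : List String) :
    ∀ (trunc : List String) (t : Int),
      truncAuxA mc docs trunc t = trunc ++ bCore mc docs t := by
  induction docs with
  | nil => intro trunc t; simp [truncAuxA, bCore, psums, List.findIdx?_nil]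
  | cons d r ih =>
    intro trunc t
    by_cases h : t + PySem.Str.len d ≤ mc
    · have hp : (fun c => decide (mc < c)) (t + PySem.Str.len d) = false := by
        simp only [decide_eq_false_iff_not, not_lt]; exact h
      rw [truncAuxA, if_pos h, ih]
      show _ = trunc ++ bCore mc (d :: r) t
      unfold bCore
      rw [show psums (d :: r) t = (t + PySem.Str.len d) :: psums r (t + PySem.Str.len d) from rfl,
        List.findIdx?_cons]
      simp only [hp, Bool.false_eq_true, if_false]
      cases hfi : (psums r (t + PySem.Str.len d)).findIdx? (fun c => mc < c) with
      | none => simp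
      | some k =>
        simp only [Option.map_some]
        simp [List.take_succ_cons]
    · have hp : (fun c => decide (mc < c)) (t + PySem.Str.len d) = true := by
        simp only [decide_eq_true_eq]; omega
      rw [truncAuxA, if_neg h]
      unfold bCore
      rw [show psums (d :: r) t = (t + PySem.Str.len d) :: psums r (t + PySem.Str.len d) from rfl,
        List.findIdx?_cons]
      simp only [hp, if_true]
      by_cases hr : mc - t > 500 <;> simp [hr]

-- ===== VERDICT (by name: the statement is the Claim_ definition above) =====
theorem truncate_documents_spec : Claim_equal_truncate_documents := by
  intro documents max_tokens _
  unfold Spec_truncate_documents truncate_documents truncate_documents_alt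
  have hpre := foldl_prefix documents [] 0
  simp only [List.nil_append] at hpre
  rw [hpre, truncAuxA_eq]
  simp only [List.nil_append, List.drop_succ_cons, List.drop_zero]
  unfold bCore
  cases hfi : (psums documents 0).findIdx? (fun c => max_tokens * 4 < c) with
  | none => simp
  | some cut =>
    simp only []
    rw [PySem.List.slice_to_natCast]
    split <;> simp
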